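-- pv_equiv track=rewrite | github.com/ProMeX04/DSA-PTIT | DSA02026.py | generate_number
-- ===== SOURCE A (Python) =====
-- def generate_number(nums):
--     X = "0123456789"
--     if nums[0] == "?":
--         for i in range(1, 10):
--             result = X[i]
--             if nums[1] == "?":
--                 for j in range(10):
--                     yield result + X[j]
--             else:
--                 yield X[i] + nums[1]
--     else:
--         result = nums[0]
--         if nums[1] == "?":
--             for i in range(10):
--                 yield nums[0] + X[i]
--         else:
--             yield nums
-- ===== SOURCE B (Python) =====
-- def generate_number(nums):
--     # Worklist refinement: keep a queue of two-char templates and repeatedly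
--     # expand the first wildcard; a template with no wildcard is emitted.
--     if "?" not in nums[:2]:
--         yield nums
--         return
--     queue = [nums[:2]]
--     while queue:
--         t = queue.pop(0)
--         i = next((k for k, c in enumerate(t) if c == "?"), -1)
--         if i < 0:
--             yield t
--         else:
--             digits = "123456789" if i == 0 else "0123456789"
--             queue.extend(t[:i] + d + t[i + 1:] for d in digits)
-- ===== Notes on version B (the rewrite author's own statement) =====
-- stated objective: alternative
-- what changed: Replaces A's four-way branch nest of yield loops by a worklist/fixpoint algorithm: a queue of templates in which the first wildcard is repeatedly substituted by each candidate digit until no wildcard remains, with the single non-wildcard guard emitting nums itself.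
import Mathlib
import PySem

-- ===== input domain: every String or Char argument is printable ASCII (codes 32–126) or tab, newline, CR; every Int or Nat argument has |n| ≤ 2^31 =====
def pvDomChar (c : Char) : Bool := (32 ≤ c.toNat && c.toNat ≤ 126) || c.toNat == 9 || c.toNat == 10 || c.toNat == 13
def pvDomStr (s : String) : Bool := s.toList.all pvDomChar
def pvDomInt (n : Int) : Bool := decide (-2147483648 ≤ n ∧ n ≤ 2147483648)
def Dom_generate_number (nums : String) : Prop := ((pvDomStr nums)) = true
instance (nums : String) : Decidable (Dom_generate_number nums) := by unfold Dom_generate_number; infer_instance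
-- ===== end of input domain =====

-- B replaces A's branch nest by a worklist algorithm repeatedly substituting the first wildcard (objective: alternative).

-- ===== PORT A =====
-- A is a generator; its port returns the list of yielded values.
def generate_number (nums : String) : List String :=
  let X := "0123456789".toList
  match PySem.Str.pyGet? nums 0, PySem.Str.pyGet? nums 1 with
  | some c0, some c1 =>
    if c0 = '?' then
      (PySem.List.pyRange 1 10 1).foldl (fun acc i =>
        match PySem.List.pyGet? X i with
        | none => acc
        | some r =>
          if c1 = '?' then
            (PySem.List.pyRange 0 10 1).foldl (fun acc2 j =>
              match PySem.List.pyGet? X j with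
              | none => acc2
              | some xj => acc2 ++ [String.ofList [r, xj]]) acc
          else acc ++ [String.ofList [r, c1]]) []
    else
      if c1 = '?' then
        (PySem.List.pyRange 0 10 1).foldl (fun acc i =>
          match PySem.List.pyGet? X i with
          | none => acc
          | some xi => acc ++ [String.ofList [c0, xi]]) []
      else [nums]
  | _, _ => []  -- IndexError in Python: excluded by Pre_

-- ===== PORT B =====
-- index of the first '?' in t, scanning with a counter (port of
-- `next((k for k, c in enumerate(t) if c == "?"), -1)`, exact; none = -1)
def firstQ : List Char → Nat → Option Nat
  | [], _ => none
  | c :: cs, k => if c = '?' then some k else firstQ cs (k + 1)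

-- the `while queue:` loop; fuel is only a totality guard (the loop pops at
-- most 1 + 9 + 90 = 100 templates, so fuel 200 is never exhausted)
def bfs : Nat → List (List Char) → List String → List String
  | 0, _, acc => acc
  | _ + 1, [], acc => acc
  | f + 1, t :: rest, acc =>
    match firstQ t 0 with
    | none => bfs f rest (acc ++ [String.ofList t])
    | some i =>
      let digits := if i = 0 then "123456789".toList else "0123456789".toList
      bfs f (rest ++ digits.map (fun d => t.take i ++ [d] ++ t.drop (i + 1))) acc

def generate_number_alt (nums : String) : List String :=
  let head := PySem.List.slice nums.toList none (some 2)   -- nums[:2]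
  if '?' ∈ head then bfs 200 [head] [] else [nums]

-- ===== PRECONDITION & SPEC =====
-- Python A raises IndexError (nums[0] or nums[1]) on strings shorter than 2; those are excluded.
def Pre_generate_number (nums : String) : Prop := 2 ≤ nums.toList.length
instance (nums : String) : Decidable (Pre_generate_number nums) := by unfold Pre_generate_number; infer_instance
def pvWitness_generate_number : String := "?7"

def Spec_generate_number (nums : String) (out : List String) : Prop := out = generate_number_alt nums
instance (nums : String) (out : List String) : Decidable (Spec_generate_number nums out) := by unfold Spec_generate_number; infer_instance

-- ===== CLAIM (what is proved, stated in full; the proofs are below) =====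
def Claim_equal_generate_number : Prop := ∀ (nums : String), Dom_generate_number nums → Pre_generate_number nums → Spec_generate_number nums (generate_number nums)

-- ===== LEMMAS AND PROOFS =====
theorem pv_range19 : PySem.List.pyRange 1 10 1 = [1,2,3,4,5,6,7,8,9] := by decide
theorem pv_range09 : PySem.List.pyRange 0 10 1 = [0,1,2,3,4,5,6,7,8,9] := by decide

theorem pv_head2 (nums : String) (c0 c1 : Char) (rest : List Char)
    (h : nums.toList = c0 :: c1 :: rest) :
    PySem.List.slice nums.toList none (some 2) = [c0, c1] := by
  rw [h]
  simp [pysem]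

set_option maxRecDepth 4000 in
theorem generate_number_eq_alt (nums : String) (c0 c1 : Char) (rest : List Char)
    (h : nums.toList = c0 :: c1 :: rest) :
    generate_number nums = generate_number_alt nums := by
  have h0 : PySem.Str.pyGet? nums 0 = some c0 := by
    have := PySem.List.pyGet?_zero_cons c0 (c1 :: rest)
    simp [h, this]
  have h1 : PySem.Str.pyGet? nums 1 = some c1 := by
    simp [h]
  have hh := pv_head2 nums c0 c1 rest h
  unfold generate_number generate_number_alt
  rw [h0, h1, hh]
  by_cases e0 : c0 = '?' <;> by_cases e1 : c1 = '?' <;>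
    simp [e0, e1, pv_range19, pv_range09, List.foldl, bfs, firstQ,
      PySem.List.pyGet?, PySem.List.pyIdx?] <;> tauto

-- ===== VERDICT (by name: the statement is the Claim_ definition above) =====
theorem generate_number_spec : Claim_equal_generate_number := by
  intro nums _ hpre
  unfold Spec_generate_number
  match hh : nums.toList with
  | [] => simp [Pre_generate_number, hh] at hpre
  | [c] => simp [Pre_generate_number, hh] at hpre
  | c0 :: c1 :: rest => exact generate_number_eq_alt nums c0 c1 rest hh
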